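-- pv_equiv track=rewrite | github.com/flav1s/pythonchallenges | classLotteryCoupons.py | SomaDigitos
-- ===== SOURCE A (Python) =====
-- def SomaDigitos(n):
--     if n == 0:
--         return 0
--
--     coupons = range(1, n+1)
--     couponsMod = list(map(lambda x: abs(x) % 10, coupons))
--     couponsDiv = list(map(lambda x: abs(x) // 10, coupons))
--     couponsSum = couponsMod
--
--     while list(filter(lambda x: x != 0, couponsDiv)):
--         couponsMod = list(map(lambda x: x % 10, couponsDiv))
--         couponsDiv = list(map(lambda x: x // 10, couponsDiv))
--         couponsSum = list(map(lambda x, y: x + y, couponsSum, couponsMod))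
--
--     return couponsSum
-- ===== SOURCE B (Python) =====
-- def SomaDigitos(n):
--     # DP over 1..n: digit_sum(i) = digit_sum(i // 10) + i % 10, one pass.
--     ds = [0] * (n + 1)
--     for i in range(1, n + 1):
--         ds[i] = ds[i // 10] + i % 10
--     return ds[1:]
-- ===== Notes on version B (the rewrite author's own statement) =====
-- stated objective: faster
-- what changed: Replaces A's whole-list peel loop (repeatedly mapping %10 and //10 over all n coupons until every quotient is zero) with a single-pass DP table ds[i] = ds[i//10] + i%10.
-- outside the precondition, e.g. on SomaDigitos(0): A returns 0, B returns []
import Mathlib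
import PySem

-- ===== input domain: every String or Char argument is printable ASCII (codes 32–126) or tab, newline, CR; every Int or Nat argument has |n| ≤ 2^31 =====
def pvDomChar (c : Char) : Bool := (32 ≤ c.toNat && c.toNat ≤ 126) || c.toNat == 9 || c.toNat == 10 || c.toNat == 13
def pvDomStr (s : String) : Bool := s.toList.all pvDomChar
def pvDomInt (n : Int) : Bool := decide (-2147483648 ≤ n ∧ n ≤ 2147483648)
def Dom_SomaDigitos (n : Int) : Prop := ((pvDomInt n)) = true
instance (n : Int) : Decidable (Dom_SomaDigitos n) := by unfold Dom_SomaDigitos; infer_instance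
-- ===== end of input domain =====

-- B replaces A's repeated whole-list peel passes (%10 / //10 over all n coupons until
-- every quotient is zero) with a one-pass DP table ds[i] = ds[i//10] + i%10.

-- ===== PORT A =====
-- the while-loop of A; fuel is a totality guard only (the loop runs at most
-- #digits(n) times, and n.natAbs + 1 fuel always suffices — proved below)
def pvLoopA (fuel : Nat) (sums divs : List Int) : List Int :=
  match fuel with
  | 0 => sums
  | fuel + 1 =>
    if (divs.filter (fun x => x != 0)) ≠ [] then
      let mods := divs.map (fun x => PySem.Int.mod x 10)
      let divs' := divs.map (fun x => PySem.Int.floordiv x 10)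
      let sums' := List.zipWith (· + ·) sums mods
      pvLoopA fuel sums' divs'
    else sums

def SomaDigitos (n : Int) : List Int :=
  if n = 0 then []  -- A returns the int 0 here (not a list value); excluded by Pre_
  else
    let coupons := PySem.List.pyRange 1 (n + 1) 1
    let mods := coupons.map (fun x => PySem.Int.mod |x| 10)
    let divs := coupons.map (fun x => PySem.Int.floordiv |x| 10)
    pvLoopA (n.natAbs + 1) mods divs

-- ===== PORT B =====
def SomaDigitos_alt (n : Int) : List Int :=
  let ds0 : Array Int := Array.replicate (n + 1).toNat 0
  -- indices i.toNat and (i//10).toNat are within bounds for every i in range(1, n+1)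
  let ds := (PySem.List.pyRange 1 (n + 1) 1).foldl
    (fun a i => a.setIfInBounds i.toNat
        (a.getD (PySem.Int.floordiv i 10).toNat 0 + PySem.Int.mod i 10)) ds0
  ds.toList.drop 1

-- ===== PRECONDITION & SPEC =====
-- Pre_ excludes only n = 0, where A returns the plain int 0 instead of a list.
def Pre_SomaDigitos (n : Int) : Prop := n ≠ 0
instance (n : Int) : Decidable (Pre_SomaDigitos n) := by unfold Pre_SomaDigitos; infer_instance
def pvWitness_SomaDigitos : Int := (12)

def Spec_SomaDigitos (n : Int) (out : List Int) : Prop := out = SomaDigitos_alt n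
instance (n : Int) (out : List Int) : Decidable (Spec_SomaDigitos n out) := by unfold Spec_SomaDigitos; infer_instance

-- ===== CLAIM (what is proved, stated in full; the proofs are below) =====
def Claim_equal_SomaDigitos : Prop := ∀ (n : Int), Dom_SomaDigitos n → Pre_SomaDigitos n → Spec_SomaDigitos n (SomaDigitos n)

-- ===== LEMMAS AND PROOFS =====

-- reference: the digit sum, and the intended output list
def digsum (m : Nat) : Nat :=
  if h : m = 0 then 0 else digsum (m / 10) + m % 10
decreasing_by exact Nat.div_lt_self (Nat.pos_of_ne_zero h) (by omega)

lemma digsum_step (m : Nat) : digsum m = digsum (m / 10) + m % 10 := by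
  rw [digsum]; split
  · simp_all [digsum]
  · rfl

def refList (n : Int) : List Int :=
  (PySem.List.pyRange 1 (n + 1) 1).map (fun x => (digsum x.toNat : Int))

lemma loopA_map (fuel : Nat) (c : List Int) (f g : Int → Int)
    (hg : ∀ x ∈ c, 0 ≤ g x ∧ (g x).toNat < 10 ^ fuel) :
    pvLoopA fuel (c.map f) (c.map g)
      = c.map (fun x => f x + (digsum (g x).toNat : Int)) := by
  induction fuel generalizing f g with
  | zero =>
    simp only [pvLoopA]
    refine (List.map_congr_left fun x hx => ?_).symm
    have := hg x hx
    have hgx : g x = 0 := by omega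
    simp [hgx, digsum]
  | succ fuel ih =>
    simp only [pvLoopA]
    by_cases hall : ∀ x ∈ c, g x = 0
    · have hfil : (c.map g).filter (fun x => x != 0) = [] := by
        simp [List.filter_eq_nil_iff]; exact hall
      rw [if_neg (by simp [hfil])]
      refine (List.map_congr_left fun x hx => ?_).symm
      simp [hall x hx, digsum]
    · have hfil : (c.map g).filter (fun x => x != 0) ≠ [] := by
        push Not at hall
        obtain ⟨x, hx, hxne⟩ := hall
        simp only [ne_eq, List.filter_eq_nil_iff, not_forall]
        exact ⟨g x, by simpa using ⟨x, hx, rfl⟩, by simpa using hxne⟩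
      rw [if_pos hfil]
      simp only [List.map_map, List.zipWith_map, List.zipWith_self, Function.comp_def]
      rw [ih (fun x => f x + PySem.Int.mod (g x) 10)
            (fun x => PySem.Int.floordiv (g x) 10) ?_]
      · refine List.map_congr_left fun x hx => ?_
        obtain ⟨hge, hlt⟩ := hg x hx
        have hfd : PySem.Int.floordiv (g x) 10 = g x / 10 :=
          PySem.Int.floordiv_eq_ediv_of_pos (by norm_num)
        have hmd : PySem.Int.mod (g x) 10 = g x % 10 :=
          PySem.Int.mod_eq_emod_of_pos (by norm_num)
        have h1 : (g x / 10).toNat = (g x).toNat / 10 := by omega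
        have h2 : (g x % 10) = ((g x).toNat % 10 : Nat) := by omega
        rw [hfd, hmd, h1, h2, digsum_step (g x).toNat]
        push_cast
        ring
      · intro x hx
        dsimp only
        obtain ⟨hge, hlt⟩ := hg x hx
        have hfd : PySem.Int.floordiv (g x) 10 = g x / 10 :=
          PySem.Int.floordiv_eq_ediv_of_pos (by norm_num)
        constructor
        · rw [hfd]; exact Int.ediv_nonneg hge (by norm_num)
        · rw [hfd]
          have h1 : (g x / 10).toNat = (g x).toNat / 10 := by omega
          rw [h1]
          have h10 : (g x).toNat < 10 * 10 ^ fuel := by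
            calc (g x).toNat < 10 ^ (fuel + 1) := hlt
              _ = 10 * 10 ^ fuel := by ring
          exact Nat.div_lt_of_lt_mul h10

lemma a_eq_ref (n : Int) (h0 : n ≠ 0) (hdom : n ≤ 2147483648) :
    SomaDigitos n = refList n := by
  unfold SomaDigitos refList
  rw [if_neg h0]
  rw [loopA_map (n.natAbs + 1) _ (fun x => PySem.Int.mod |x| 10)
        (fun x => PySem.Int.floordiv |x| 10) ?_]
  · refine List.map_congr_left fun x hx => ?_
    rw [PySem.List.mem_pyRange_one] at hx
    have hx1 : 1 ≤ x := hx.1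
    have habs : |x| = x := abs_of_pos (by omega)
    have hfd : PySem.Int.floordiv x 10 = x / 10 :=
      PySem.Int.floordiv_eq_ediv_of_pos (by norm_num)
    have hmd : PySem.Int.mod x 10 = x % 10 :=
      PySem.Int.mod_eq_emod_of_pos (by norm_num)
    have h1 : (x / 10).toNat = x.toNat / 10 := by omega
    have h2 : (x % 10) = (x.toNat % 10 : Nat) := by omega
    simp only [habs, hfd, hmd, h1, h2]
    rw [digsum_step x.toNat]
    push_cast
    ring
  · intro x hx
    rw [PySem.List.mem_pyRange_one] at hx
    have hx1 : 1 ≤ x := hx.1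
    have habs : |x| = x := abs_of_pos (by omega)
    have hfd : PySem.Int.floordiv x 10 = x / 10 :=
      PySem.Int.floordiv_eq_ediv_of_pos (by norm_num)
    simp only [habs, hfd]
    constructor
    · exact Int.ediv_nonneg (by omega) (by norm_num)
    · have hle : (x / 10).toNat ≤ n.natAbs := by omega
      calc (x / 10).toNat ≤ n.natAbs := hle
        _ < 10 ^ n.natAbs := Nat.lt_pow_self (by norm_num)
        _ ≤ 10 ^ (n.natAbs + 1) := Nat.pow_le_pow_right (by norm_num) (by omega)

-- getD facts for the B-side array
lemma getD_setIfInBounds_self (a : Array Int) (i : Nat) (v : Int) (h : i < a.size) :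
    (a.setIfInBounds i v).getD i 0 = v := by
  simp [Array.getD, h]

lemma getD_setIfInBounds_ne (a : Array Int) (i j : Nat) (v : Int) (h : i ≠ j) :
    (a.setIfInBounds i v).getD j 0 = a.getD j 0 := by
  simp only [Array.getD, Array.size_setIfInBounds]
  split
  · exact Array.getElem_setIfInBounds_ne _ h
  · rfl

-- invariant of B's fold: after processing 1..k, slot j holds digsum j for j ≤ k and 0 above
lemma bfold (N : Nat) (k : Nat) (hk : k ≤ N) :
    ((PySem.List.pyRange 1 ((k : Int) + 1) 1).foldl
        (fun a i => a.setIfInBounds i.toNat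
          (a.getD (PySem.Int.floordiv i 10).toNat 0 + PySem.Int.mod i 10))
        (Array.replicate (N + 1) 0)).size = N + 1 ∧
    ∀ j : Nat, ((PySem.List.pyRange 1 ((k : Int) + 1) 1).foldl
        (fun a i => a.setIfInBounds i.toNat
          (a.getD (PySem.Int.floordiv i 10).toNat 0 + PySem.Int.mod i 10))
        (Array.replicate (N + 1) 0)).getD j 0
      = if j ≤ k then (digsum j : Int) else 0 := by
  induction k with
  | zero =>
    rw [PySem.List.pyRange_one_eq_nil (by norm_num)]
    refine ⟨by simp, fun j => ?_⟩
    simp only [List.foldl_nil]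
    split
    · have : j = 0 := by omega
      simp [this, Array.getD, digsum]
    · simp [Array.getD]
  | succ k ih =>
    have ih' := ih (by omega)
    have hsplit : PySem.List.pyRange 1 ((↑(k + 1) : Int) + 1) 1
        = PySem.List.pyRange 1 ((k : Int) + 1) 1 ++ [((k : Int) + 1)] := by
      have := PySem.List.pyRange_one_succ_right (a := 1) (b := (k : Int) + 1) (by omega)
      push_cast
      push_cast at this
      exact this
    rw [hsplit, List.foldl_append]
    set A := (PySem.List.pyRange 1 ((k : Int) + 1) 1).foldl
        (fun a i => a.setIfInBounds i.toNat
          (a.getD (PySem.Int.floordiv i 10).toNat 0 + PySem.Int.mod i 10))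
        (Array.replicate (N + 1) 0) with hA
    obtain ⟨hsize, hget⟩ := ih'
    simp only [List.foldl_cons, List.foldl_nil]
    have hidx : ((k : Int) + 1).toNat = k + 1 := by omega
    have hfd : PySem.Int.floordiv ((k : Int) + 1) 10 = (((k + 1) / 10 : Nat) : Int) := by
      exact_mod_cast PySem.Int.floordiv_natCast (k + 1) 10
    have hmd : PySem.Int.mod ((k : Int) + 1) 10 = (((k + 1) % 10 : Nat) : Int) := by
      exact_mod_cast PySem.Int.mod_natCast (k + 1) 10
    have hdivle : (k + 1) / 10 ≤ k := by
      have := Nat.div_lt_self (n := k + 1) (by omega) (by norm_num : (1:Nat) < 10)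
      omega
    have hval : A.getD (((k + 1) / 10 : Nat)) 0 = (digsum ((k + 1) / 10) : Int) := by
      rw [hget]; rw [if_pos hdivle]
    simp only [hidx, hfd, hmd, Int.toNat_natCast, hval]
    constructor
    · simp [hsize]
    · intro j
      by_cases hj : j = k + 1
      · subst hj
        rw [getD_setIfInBounds_self _ _ _ (by omega)]
        rw [if_pos (le_refl _)]
        rw [digsum_step (k + 1)]
        push_cast
        ring
      · rw [getD_setIfInBounds_ne _ _ _ _ (by omega)]
        rw [hget]
        by_cases hjk : j ≤ k
        · rw [if_pos hjk, if_pos (by omega)]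
        · rw [if_neg hjk, if_neg (by omega)]

lemma b_eq_ref (n : Int) : SomaDigitos_alt n = refList n := by
  by_cases hn : n ≤ 0
  · by_cases h0 : n = 0
    · subst h0; decide
    · have h1 : (n + 1).toNat = 0 := by omega
      unfold SomaDigitos_alt refList
      rw [PySem.List.pyRange_one_eq_nil (by omega), h1]
      simp
  · -- n ≥ 1
    have hN : n = ((n.toNat : Nat) : Int) := by omega
    set N := n.toNat with hNdef
    obtain ⟨hsize, hget⟩ := bfold N N (le_refl N)
    unfold SomaDigitos_alt refList
    have hcast : n + 1 = ((N : Int) + 1) := by omega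
    rw [hcast]
    rw [show ((N : Int) + 1).toNat = N + 1 from by omega]
    set A := (PySem.List.pyRange 1 ((N : Int) + 1) 1).foldl
        (fun a i => a.setIfInBounds i.toNat
          (a.getD (PySem.Int.floordiv i 10).toNat 0 + PySem.Int.mod i 10))
        (Array.replicate (N + 1) 0) with hA
    refine List.ext_getElem ?_ ?_
    · rw [List.length_drop, Array.length_toList, hsize, List.length_map,
        PySem.List.length_pyRange_one]
      omega
    · intro j h1 h2
      have hj : j < N := by
        rw [List.length_drop, Array.length_toList, hsize] at h1; omega
      rw [List.getElem_drop]
      have hjs : 1 + j < A.size := by omega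
      rw [List.getElem_map, PySem.List.getElem_pyRange_one]
      have htl : A.toList[1 + j]'(by simpa using hjs) = A.getD (1 + j) 0 := by
        simp [Array.getD, hjs]
      rw [htl, hget (1 + j), if_pos (by omega)]
      congr 1

-- ===== VERDICT (by name: the statement is the Claim_ definition above) =====
theorem SomaDigitos_spec : Claim_equal_SomaDigitos := by
  intro n hdom hpre
  unfold Spec_SomaDigitos
  have hd : n ≤ 2147483648 := by
    unfold Dom_SomaDigitos pvDomInt at hdom; simp at hdom; omega
  rw [a_eq_ref n hpre hd, b_eq_ref n]
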